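-- pv_equiv track=rewrite | github.com/anandvijay96/kp-crewai-bot | src/seo_automation/tools/content_analysis.py | _identify_comment_opportunities
-- ===== SOURCE A (Python) =====
-- from typing import Dict, List, Optional, Any, Tuple
--
-- def _identify_comment_opportunities(content: str, structure: Dict) -> List[Dict[str, Any]]:
--     """Identify opportunities for meaningful comments"""
--     opportunities = []
--
--     # Questions in content
--     if structure['question_count'] > 0:
--         opportunities.append({
--             'type': 'question_response',
--             'description': f"Content contains {structure['question_count']} questions that can be addressed",
--             'priority': 'high'
--         })
--
--     # Controversial or debate topics
--     debate_indicators = [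
--         'controversial', 'debate', 'argue', 'disagree', 'opinion', 'believe',
--         'think', 'consider', 'perspective', 'viewpoint'
--     ]
--
--     debate_mentions = sum(1 for indicator in debate_indicators if indicator in content.lower())
--     if debate_mentions > 2:
--         opportunities.append({
--             'type': 'perspective_sharing',
--             'description': "Content discusses debatable topics - opportunity for perspective sharing",
--             'priority': 'medium'
--         })
--
--     # How-to or tutorial content
--     if any(phrase in content.lower() for phrase in ['how to', 'step by step', 'tutorial', 'guide']):
--         opportunities.append({
--             'type': 'experience_sharing',
--             'description': "Tutorial content - opportunity to share related experiences",
--             'priority': 'high'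
--         })
--
--     # Industry trends or news
--     trend_indicators = ['trend', 'latest', 'new', 'update', 'change', 'future', '2024', '2025']
--     trend_mentions = sum(1 for indicator in trend_indicators if indicator in content.lower())
--     if trend_mentions > 3:
--         opportunities.append({
--             'type': 'trend_discussion',
--             'description': "Content discusses industry trends - opportunity for trend analysis",
--             'priority': 'medium'
--         })
--
--     # Problem-solution content
--     problem_indicators = ['problem', 'issue', 'challenge', 'struggle', 'difficult', 'solution']
--     problem_mentions = sum(1 for indicator in problem_indicators if indicator in content.lower())
--     if problem_mentions > 2:
--         opportunities.append({
--             'type': 'solution_offering',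
--             'description': "Content discusses problems - opportunity to offer solutions or alternatives",
--             'priority': 'high'
--         })
--
--     return opportunities
-- ===== SOURCE B (Python) =====
-- # B: instead of four separate count-then-check blocks, build one flat
-- # keyword->category index, scan it once to collect the multiset of matched
-- # categories, then emit opportunities from a threshold table over that multiset.
--
-- _KEYWORD_INDEX = (
--     [(kw, 'perspective_sharing') for kw in
--      ['controversial', 'debate', 'argue', 'disagree', 'opinion', 'believe',
--       'think', 'consider', 'perspective', 'viewpoint']] +
--     [(kw, 'experience_sharing') for kw in
--      ['how to', 'step by step', 'tutorial', 'guide']] +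
--     [(kw, 'trend_discussion') for kw in
--      ['trend', 'latest', 'new', 'update', 'change', 'future', '2024', '2025']] +
--     [(kw, 'solution_offering') for kw in
--      ['problem', 'issue', 'challenge', 'struggle', 'difficult', 'solution']]
-- )
--
-- _THRESHOLDS = [
--     ('perspective_sharing', 2,
--      {'type': 'perspective_sharing',
--       'description': "Content discusses debatable topics - opportunity for perspective sharing",
--       'priority': 'medium'}),
--     ('experience_sharing', 0,
--      {'type': 'experience_sharing',
--       'description': "Tutorial content - opportunity to share related experiences",
--       'priority': 'high'}),
--     ('trend_discussion', 3,
--      {'type': 'trend_discussion',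
--       'description': "Content discusses industry trends - opportunity for trend analysis",
--       'priority': 'medium'}),
--     ('solution_offering', 2,
--      {'type': 'solution_offering',
--       'description': "Content discusses problems - opportunity to offer solutions or alternatives",
--       'priority': 'high'}),
-- ]
--
--
-- def _identify_comment_opportunities(content, structure):
--     """Identify opportunities for meaningful comments."""
--     opportunities = []
--     if structure['question_count'] > 0:
--         opportunities.append({
--             'type': 'question_response',
--             'description': f"Content contains {structure['question_count']} questions that can be addressed",
--             'priority': 'high'
--         })
--     lowered = content.lower()
--     matched = [cat for kw, cat in _KEYWORD_INDEX if kw in lowered]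
--     for cat, threshold, opportunity in _THRESHOLDS:
--         if matched.count(cat) > threshold:
--             opportunities.append(dict(opportunity))
--     return opportunities
-- ===== Notes on version B (the rewrite author's own statement) =====
-- stated objective: alternative
-- what changed: A runs four independent count-then-append blocks, each rescanning the (re-lowered) content over its own indicator list; B inverts the data into one flat keyword-to-category index, makes a single staged pass collecting the multiset of matched categories, and then emits opportunities by reading a threshold table against that multiset (the any(...) becomes count > 0).
import Mathlib
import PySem

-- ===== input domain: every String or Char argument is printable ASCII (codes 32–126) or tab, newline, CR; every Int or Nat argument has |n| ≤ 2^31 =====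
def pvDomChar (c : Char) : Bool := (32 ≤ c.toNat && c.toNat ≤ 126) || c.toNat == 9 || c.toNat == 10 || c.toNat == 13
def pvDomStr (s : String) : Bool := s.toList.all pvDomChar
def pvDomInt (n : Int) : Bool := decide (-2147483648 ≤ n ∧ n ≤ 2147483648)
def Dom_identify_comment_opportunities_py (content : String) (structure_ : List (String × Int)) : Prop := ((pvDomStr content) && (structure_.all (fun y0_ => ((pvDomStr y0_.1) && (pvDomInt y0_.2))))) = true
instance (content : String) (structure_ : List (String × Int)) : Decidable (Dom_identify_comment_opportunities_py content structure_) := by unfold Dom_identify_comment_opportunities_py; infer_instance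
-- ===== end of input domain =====

-- B inverts A's four count-then-append blocks into one keyword->category index scanned once,
-- then a threshold table read against the collected multiset of matched categories (objective: alternative, same cost).

-- ===== PORT A =====
-- literal transliteration of A: sequential appends, each sum/any loop written out
def identify_comment_opportunities_py (content : String) (structure_ : List (String × Int)) : List (List (String × String)) :=
  let qc : Int := (PySem.Dict.ofList structure_).getD "question_count" 0  -- structure['question_count']; missing key excluded by Pre_
  let opportunities : List (List (String × String)) := []
  let opportunities :=
    if qc > 0 then
      opportunities ++ [[("type", "question_response"),
        ("description", "Content contains " ++ PySem.Int.toStr qc ++ " questions that can be addressed"),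
        ("priority", "high")]]
    else opportunities
  let debate_indicators : List String := ["controversial", "debate", "argue", "disagree", "opinion", "believe",
    "think", "consider", "perspective", "viewpoint"]
  let debate_mentions : Int := debate_indicators.foldl
    (fun acc indicator => if PySem.Str.isIn indicator (PySem.Str.lower content) then acc + 1 else acc) 0
  let opportunities :=
    if debate_mentions > 2 then
      opportunities ++ [[("type", "perspective_sharing"),
        ("description", "Content discusses debatable topics - opportunity for perspective sharing"),
        ("priority", "medium")]]
    else opportunities
  let opportunities :=
    if (["how to", "step by step", "tutorial", "guide"].any
        (fun phrase => PySem.Str.isIn phrase (PySem.Str.lower content))) then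
      opportunities ++ [[("type", "experience_sharing"),
        ("description", "Tutorial content - opportunity to share related experiences"),
        ("priority", "high")]]
    else opportunities
  let trend_indicators : List String := ["trend", "latest", "new", "update", "change", "future", "2024", "2025"]
  let trend_mentions : Int := trend_indicators.foldl
    (fun acc indicator => if PySem.Str.isIn indicator (PySem.Str.lower content) then acc + 1 else acc) 0
  let opportunities :=
    if trend_mentions > 3 then
      opportunities ++ [[("type", "trend_discussion"),
        ("description", "Content discusses industry trends - opportunity for trend analysis"),
        ("priority", "medium")]]
    else opportunities
  let problem_indicators : List String := ["problem", "issue", "challenge", "struggle", "difficult", "solution"]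
  let problem_mentions : Int := problem_indicators.foldl
    (fun acc indicator => if PySem.Str.isIn indicator (PySem.Str.lower content) then acc + 1 else acc) 0
  let opportunities :=
    if problem_mentions > 2 then
      opportunities ++ [[("type", "solution_offering"),
        ("description", "Content discusses problems - opportunity to offer solutions or alternatives"),
        ("priority", "high")]]
    else opportunities
  opportunities

-- ===== PORT B =====
-- _KEYWORD_INDEX of Source B: flat keyword -> category pairs, built segment by segment
def pvKeywordIndex : List (String × String) :=
  (["controversial", "debate", "argue", "disagree", "opinion", "believe",
    "think", "consider", "perspective", "viewpoint"].map (fun kw => (kw, "perspective_sharing"))) ++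
  (["how to", "step by step", "tutorial", "guide"].map (fun kw => (kw, "experience_sharing"))) ++
  (["trend", "latest", "new", "update", "change", "future", "2024", "2025"].map (fun kw => (kw, "trend_discussion"))) ++
  (["problem", "issue", "challenge", "struggle", "difficult", "solution"].map (fun kw => (kw, "solution_offering")))

-- _THRESHOLDS of Source B: (category, threshold, opportunity dict)
def pvThresholds : List (String × Nat × List (String × String)) :=
  [ ("perspective_sharing", 2,
     [("type", "perspective_sharing"),
      ("description", "Content discusses debatable topics - opportunity for perspective sharing"),
      ("priority", "medium")]),
    ("experience_sharing", 0,
     [("type", "experience_sharing"),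
      ("description", "Tutorial content - opportunity to share related experiences"),
      ("priority", "high")]),
    ("trend_discussion", 3,
     [("type", "trend_discussion"),
      ("description", "Content discusses industry trends - opportunity for trend analysis"),
      ("priority", "medium")]),
    ("solution_offering", 2,
     [("type", "solution_offering"),
      ("description", "Content discusses problems - opportunity to offer solutions or alternatives"),
      ("priority", "high")]) ]

def identify_comment_opportunities_py_alt (content : String) (structure_ : List (String × Int)) : List (List (String × String)) :=
  let qc : Int := (PySem.Dict.ofList structure_).getD "question_count" 0
  let head : List (List (String × String)) :=
    if qc > 0 then
      [[("type", "question_response"),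
        ("description", "Content contains " ++ PySem.Int.toStr qc ++ " questions that can be addressed"),
        ("priority", "high")]]
    else []
  let lowered := PySem.Str.lower content
  let matched : List String :=
    (pvKeywordIndex.filter (fun p => PySem.Str.isIn p.1 lowered)).map Prod.snd
  head ++ pvThresholds.filterMap (fun t =>
    if matched.count t.1 > t.2.1 then some t.2.2 else none)

-- ===== PRECONDITION & SPEC =====
-- Pre_ excludes exactly the inputs where A raises KeyError: structure lacking the key 'question_count'.
def Pre_identify_comment_opportunities_py (content : String) (structure_ : List (String × Int)) : Prop :=
  "question_count" ∈ structure_.map Prod.fst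
instance (content : String) (structure_ : List (String × Int)) : Decidable (Pre_identify_comment_opportunities_py content structure_) := by unfold Pre_identify_comment_opportunities_py; infer_instance
def pvWitness_identify_comment_opportunities_py : String × (List (String × Int)) := ("how to guide?", [("question_count", 1)])
def Spec_identify_comment_opportunities_py (content : String) (structure_ : List (String × Int)) (out : List (List (String × String))) : Prop := out = identify_comment_opportunities_py_alt content structure_
instance (content : String) (structure_ : List (String × Int)) (out : List (List (String × String))) : Decidable (Spec_identify_comment_opportunities_py content structure_ out) := by unfold Spec_identify_comment_opportunities_py; infer_instance

-- ===== CLAIM (what is proved, stated in full; the proofs are below) =====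
def Claim_equal_identify_comment_opportunities_py : Prop := ∀ (content : String) (structure_ : List (String × Int)), Dom_identify_comment_opportunities_py content structure_ → Pre_identify_comment_opportunities_py content structure_ → Spec_identify_comment_opportunities_py content structure_ (identify_comment_opportunities_py content structure_)

-- ===== LEMMAS AND PROOFS =====

-- counting a category in the matched multiset contributed by a segment tagged with that very category = countP of the predicate
theorem pv_count_map_snd_filter_self (c : String) (lowered : String) (l : List String) :
    (((l.map (fun kw => (kw, c))).filter (fun q => PySem.Str.isIn q.1 lowered)).map Prod.snd).count c
      = l.countP (fun kw => PySem.Str.isIn kw lowered) := by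
  induction l with
  | nil => rfl
  | cons a t ih =>
      rw [List.map_cons, List.filter_cons]
      by_cases h : PySem.Str.isIn a lowered = true
      · rw [if_pos h, List.map_cons, List.count_cons_self, ih, List.countP_cons, if_pos h]
      · rw [if_neg h, ih, List.countP_cons, if_neg h, Nat.add_zero]

-- a segment tagged with a different category contributes nothing
theorem pv_count_map_snd_filter_other (c c' : String) (hne : c' ≠ c) (lowered : String) (l : List String) :
    (((l.map (fun kw => (kw, c'))).filter (fun q => PySem.Str.isIn q.1 lowered)).map Prod.snd).count c = 0 := by
  induction l with
  | nil => rfl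
  | cons a t ih =>
      rw [List.map_cons, List.filter_cons]
      by_cases h : PySem.Str.isIn a lowered = true
      · rw [if_pos h, List.map_cons, List.count_cons_of_ne hne, ih]
      · rw [if_neg h]; exact ih

-- the four category counts over the whole index, one per threshold row
theorem pv_count_perspective (lowered : String) :
    ((pvKeywordIndex.filter (fun q => PySem.Str.isIn q.1 lowered)).map Prod.snd).count "perspective_sharing"
      = (["controversial", "debate", "argue", "disagree", "opinion", "believe",
          "think", "consider", "perspective", "viewpoint"]).countP (fun kw => PySem.Str.isIn kw lowered) := by
  unfold pvKeywordIndex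
  simp only [List.filter_append, List.map_append, List.count_append,
    pv_count_map_snd_filter_self,
    pv_count_map_snd_filter_other "perspective_sharing" "experience_sharing" (by decide) lowered,
    pv_count_map_snd_filter_other "perspective_sharing" "trend_discussion" (by decide) lowered,
    pv_count_map_snd_filter_other "perspective_sharing" "solution_offering" (by decide) lowered,
    Nat.add_zero]

theorem pv_count_experience (lowered : String) :
    ((pvKeywordIndex.filter (fun q => PySem.Str.isIn q.1 lowered)).map Prod.snd).count "experience_sharing"
      = (["how to", "step by step", "tutorial", "guide"]).countP (fun kw => PySem.Str.isIn kw lowered) := by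
  unfold pvKeywordIndex
  simp only [List.filter_append, List.map_append, List.count_append,
    pv_count_map_snd_filter_self,
    pv_count_map_snd_filter_other "experience_sharing" "perspective_sharing" (by decide) lowered,
    pv_count_map_snd_filter_other "experience_sharing" "trend_discussion" (by decide) lowered,
    pv_count_map_snd_filter_other "experience_sharing" "solution_offering" (by decide) lowered,
    Nat.add_zero, Nat.zero_add]

theorem pv_count_trend (lowered : String) :
    ((pvKeywordIndex.filter (fun q => PySem.Str.isIn q.1 lowered)).map Prod.snd).count "trend_discussion"
      = (["trend", "latest", "new", "update", "change", "future", "2024", "2025"]).countP (fun kw => PySem.Str.isIn kw lowered) := by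
  unfold pvKeywordIndex
  simp only [List.filter_append, List.map_append, List.count_append,
    pv_count_map_snd_filter_self,
    pv_count_map_snd_filter_other "trend_discussion" "perspective_sharing" (by decide) lowered,
    pv_count_map_snd_filter_other "trend_discussion" "experience_sharing" (by decide) lowered,
    pv_count_map_snd_filter_other "trend_discussion" "solution_offering" (by decide) lowered,
    Nat.add_zero, Nat.zero_add]

theorem pv_count_problem (lowered : String) :
    ((pvKeywordIndex.filter (fun q => PySem.Str.isIn q.1 lowered)).map Prod.snd).count "solution_offering"
      = (["problem", "issue", "challenge", "struggle", "difficult", "solution"]).countP (fun kw => PySem.Str.isIn kw lowered) := by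
  unfold pvKeywordIndex
  simp only [List.filter_append, List.map_append, List.count_append,
    pv_count_map_snd_filter_self,
    pv_count_map_snd_filter_other "solution_offering" "perspective_sharing" (by decide) lowered,
    pv_count_map_snd_filter_other "solution_offering" "experience_sharing" (by decide) lowered,
    pv_count_map_snd_filter_other "solution_offering" "trend_discussion" (by decide) lowered,
    Nat.zero_add]

-- count > threshold reads the same whether the count is A's Int sum or B's Nat count
theorem pv_count_gt (n t : Nat) : ((0 : Int) + (n : Int) > (t : Int)) ↔ n > t := by omega

-- any(...) is count > 0
theorem pv_any_iff (l : List String) (p : String → Bool) :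
    (l.any p = true) ↔ l.countP p > 0 := by
  simp [List.any_eq_true, Nat.pos_iff_ne_zero, Ne, List.countP_eq_zero]

-- ===== VERDICT (by name: the statement is the Claim_ definition above) =====
theorem identify_comment_opportunities_py_spec : Claim_equal_identify_comment_opportunities_py := by
  intro content structure_ _ _
  unfold Spec_identify_comment_opportunities_py identify_comment_opportunities_py identify_comment_opportunities_py_alt
  unfold pvThresholds
  simp only [PySem.List.foldl_if_add_one, List.filterMap_cons, List.filterMap_nil,
    pv_count_perspective, pv_count_experience, pv_count_trend, pv_count_problem]
  rw [show ((2:Int) = ((2:Nat):Int)) from rfl, show ((3:Int) = ((3:Nat):Int)) from rfl]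
  simp only [pv_count_gt, pv_any_iff]
  split_ifs <;> simp
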